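-- pv_equiv track=rewrite | github.com/Pirogramming-20/YeonuKim | python_problem/run.py | invalidScore
-- ===== SOURCE A (Python) =====
-- def invalidScore(score):
--     for scoreChar in score:
--         if(scoreChar != '0'
--            and scoreChar != '1'
--            and scoreChar != '2'
--            and scoreChar != '3'
--            and scoreChar != '4'
--            and scoreChar != '5'
--            and scoreChar != '6'
--            and scoreChar != '7'
--            and scoreChar != '8'
--            and scoreChar != '9'):
--             return True
--     return False
-- ===== SOURCE B (Python) =====
-- def invalidScore(score):
--     # '0'..'9' are contiguous code points, so some character is a non-digit
--     # exactly when the smallest character is below '0' or the largest is above '9'.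
--     return bool(score) and (min(score) < '0' or '9' < max(score))
-- ===== Notes on version B (the rewrite author's own statement) =====
-- stated objective: alternative
-- what changed: Instead of testing each character against the ten digits with an early-exit scan, B computes the minimum and maximum character of the string and checks whether they fall outside the contiguous code-point range '0'..'9' (empty string short-circuits to False).
import Mathlib
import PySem

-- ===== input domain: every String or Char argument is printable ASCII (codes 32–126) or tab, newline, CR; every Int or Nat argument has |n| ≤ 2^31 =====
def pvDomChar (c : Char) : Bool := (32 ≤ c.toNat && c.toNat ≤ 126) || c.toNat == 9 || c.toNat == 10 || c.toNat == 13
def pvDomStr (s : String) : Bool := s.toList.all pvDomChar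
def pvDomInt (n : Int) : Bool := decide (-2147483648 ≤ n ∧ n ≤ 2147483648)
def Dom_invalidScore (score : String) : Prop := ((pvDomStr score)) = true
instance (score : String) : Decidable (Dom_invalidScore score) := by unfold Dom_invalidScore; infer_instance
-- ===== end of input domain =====

-- B replaces A's early-exit per-character digit test with a min/max range check:
-- '0'..'9' are contiguous code points, so a non-digit exists iff min(score) < '0' or max(score) > '9'.

-- ===== PORT A =====
-- the for-loop with early 'return True': structural recursion over the characters
def invalidScoreLoop : List Char → Bool
  | [] => false
  | c :: rest =>
    if c != '0' && c != '1' && c != '2' && c != '3' && c != '4'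
       && c != '5' && c != '6' && c != '7' && c != '8' && c != '9' then
      true
    else
      invalidScoreLoop rest

def invalidScore (score : String) : Bool := invalidScoreLoop score.toList

-- ===== PORT B =====
-- bool(score) and (min(score) < '0' or '9' < max(score))
def invalidScore_alt (score : String) : Bool :=
  if score.toList.isEmpty then false
  else
    match PySem.List.min? score.toList (fun c => c), PySem.List.max? score.toList (fun c => c) with
    | some lo, some hi => decide (lo < '0') || decide ('9' < hi)
    | _, _ => false

-- ===== PRECONDITION & SPEC =====
def Spec_invalidScore (score : String) (out : Bool) : Prop := out = invalidScore_alt score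
instance (score : String) (out : Bool) : Decidable (Spec_invalidScore score out) := by unfold Spec_invalidScore; infer_instance

-- ===== CLAIM (what is proved, stated in full; the proofs are below) =====
def Claim_equal_invalidScore : Prop := ∀ (score : String), Dom_invalidScore score → Spec_invalidScore score (invalidScore score)

-- ===== LEMMAS AND PROOFS =====
theorem char_not_digit_iff (c : Char) :
    c ∉ (['0','1','2','3','4','5','6','7','8','9'] : List Char) ↔ (c < '0' ∨ '9' < c) := by
  constructor
  · intro h
    by_contra hc
    rw [not_or, not_lt, not_lt] at hc
    obtain ⟨h1, h2⟩ := hc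
    have h1' : 48 ≤ c.toNat := UInt32.le_iff_toNat_le.mp (Char.le_def.mp h1)
    have h2' : c.toNat ≤ 57 := UInt32.le_iff_toNat_le.mp (Char.le_def.mp h2)
    have hc' : Char.ofNat c.toNat = c := Char.ofNat_toNat c
    apply h
    interval_cases htn : c.toNat <;> (rw [← hc']; decide)
  · intro h hmem
    rcases h with h | h <;> (fin_cases hmem <;> simp_all [Char.lt_def])

theorem cond_eq (c : Char) :
    (c != '0' && c != '1' && c != '2' && c != '3' && c != '4'
       && c != '5' && c != '6' && c != '7' && c != '8' && c != '9')
      = decide (c ∉ (['0','1','2','3','4','5','6','7','8','9'] : List Char)) := by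
  simp [List.mem_cons, not_or, bne, Bool.and_assoc, Bool.beq_eq_decide_eq]

theorem invalidScoreLoop_eq_any (l : List Char) :
    invalidScoreLoop l = l.any (fun c => decide (c < '0' ∨ '9' < c)) := by
  induction l with
  | nil => rfl
  | cons c rest ih =>
    rw [invalidScoreLoop, cond_eq, List.any_cons, ih]
    by_cases h : c < '0' ∨ '9' < c
    · simp [h, (char_not_digit_iff c).mpr h]
    · have hd : decide (c ∉ (['0','1','2','3','4','5','6','7','8','9'] : List Char)) = false :=
        decide_eq_false (fun hn => h ((char_not_digit_iff c).mp hn))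
      rw [hd]
      simp [decide_eq_false h]

-- ===== VERDICT (by name: the statement is the Claim_ definition above) =====
theorem invalidScore_spec : Claim_equal_invalidScore := by
  intro score _
  unfold Spec_invalidScore invalidScore invalidScore_alt
  rw [invalidScoreLoop_eq_any]
  cases hl : score.toList with
  | nil => simp
  | cons c rest =>
    have hne : score.toList ≠ [] := by rw [hl]; exact List.cons_ne_nil _ _
    simp only [List.isEmpty_cons, if_neg (by decide : ¬ false = true)]
    obtain ⟨lo, hlo⟩ : ∃ lo, PySem.List.min? (c :: rest) (fun c => c) = some lo := by
      cases h : PySem.List.min? (c :: rest) (fun c => c) with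
      | none => exact absurd ((PySem.List.min?_eq_none_iff _ _).mp h) (List.cons_ne_nil _ _)
      | some m => exact ⟨m, rfl⟩
    obtain ⟨hi, hhi⟩ : ∃ hi, PySem.List.max? (c :: rest) (fun c => c) = some hi := by
      cases h : PySem.List.max? (c :: rest) (fun c => c) with
      | none => exact absurd ((PySem.List.max?_eq_none_iff _ _).mp h) (List.cons_ne_nil _ _)
      | some m => exact ⟨m, rfl⟩
    rw [hlo, hhi]
    have hlomem := PySem.List.min?_mem hlo
    have hhimem := PySem.List.max?_mem hhi
    have hlomin := PySem.List.min?_isMin hlo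
    have hhimax := PySem.List.max?_isMax hhi
    rcases hb : (c :: rest).any (fun c => decide (c < '0' ∨ '9' < c)) with _ | _
    · simp only [List.any_eq_false, decide_eq_true_eq] at hb
      have h1 := (not_or.mp (hb lo hlomem)).1
      have h2 := (not_or.mp (hb hi hhimem)).2
      simp [h1, h2]
    · simp only [List.any_eq_true, decide_eq_true_eq] at hb
      obtain ⟨x, hx, hxd⟩ := hb
      rcases hxd with h | h
      · have : lo < '0' := lt_of_le_of_lt (hlomin x hx) h
        simp [this]
      · have : '9' < hi := lt_of_lt_of_le h (hhimax x hx)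
        simp [this]
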